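-- pv_equiv track=rewrite | github.com/olli22221/fantasizefreelybackend | runCreativityScoring.py | computeDurationVector
-- ===== SOURCE A (Python) =====
-- def computeDurationVector(input):
--     durations = []
--
--     for measure in input:
--         expandedMeasure = expandMeasure(measure)
--         tmpVector = []
--         for note in expandedMeasure:
--             tmpVector.append(calculateDurationValue(note['duration']))
--         durations.append(tmpVector)
--
--     return durations
--
-- midiToDuration = {"16":4,"8d":3,"q":2,"h":1,"w":0}
--
-- midiDuplication = {"16":1,"8d":2,"q":4,"h":8,"w":16}
--
-- def calculateDurationValue(duration):
--     return midiToDuration[duration]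
--
-- def calculateDuplication(dur):
--     return midiDuplication[dur]
--
-- def expandMeasure(measure):
--     result = []
--     for note in measure:
--         i = calculateDuplication(note['duration'])
--         for j in range(i):
--
--             result.append(note)
--     return result
-- ===== SOURCE B (Python) =====
-- # One combined table: duration string -> its value repeated duplication-many times;
-- # each measure's vector is just the concatenation of table entries (no expanded note list).
-- _durationVectorTable = {"16": [4], "8d": [3, 3], "q": [2, 2, 2, 2],
--                         "h": [1] * 8, "w": [0] * 16}
--
-- def computeDurationVector(input):
--     return [[v for note in measure for v in _durationVectorTable[note['duration']]]
--             for measure in input]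
-- ===== Notes on version B (the rewrite author's own statement) =====
-- stated objective: simpler
-- what changed: Replaces A's two-phase expand-measure-then-map pipeline (and its two dicts) with a single precomputed table mapping each duration string directly to its repeated-value list, so each measure's vector is one flatten with no intermediate expanded note list.
import Mathlib
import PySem

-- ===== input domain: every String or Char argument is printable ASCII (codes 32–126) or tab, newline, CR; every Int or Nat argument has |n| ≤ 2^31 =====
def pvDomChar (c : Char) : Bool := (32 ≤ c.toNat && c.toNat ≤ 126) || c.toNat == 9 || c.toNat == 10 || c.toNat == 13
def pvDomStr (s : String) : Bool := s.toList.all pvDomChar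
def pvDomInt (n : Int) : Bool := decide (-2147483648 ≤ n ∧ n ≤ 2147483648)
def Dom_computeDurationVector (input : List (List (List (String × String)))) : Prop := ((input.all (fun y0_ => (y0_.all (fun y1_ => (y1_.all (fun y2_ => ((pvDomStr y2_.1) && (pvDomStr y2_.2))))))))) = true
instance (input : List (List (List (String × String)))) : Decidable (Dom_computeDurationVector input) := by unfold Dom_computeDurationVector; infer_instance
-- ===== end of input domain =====

-- B: one combined table duration→repeated-value list, one flatten per measure (simpler decomposition).
-- Pre_ excludes inputs where any note lacks a 'duration' key in {16,8d,q,h,w}: Python A raises KeyError there.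
-- ===== PORT A =====
def midiToDuration : PySem.Dict String Int :=
  PySem.Dict.ofList [("16", 4), ("8d", 3), ("q", 2), ("h", 1), ("w", 0)]

def midiDuplication : PySem.Dict String Int :=
  PySem.Dict.ofList [("16", 1), ("8d", 2), ("q", 4), ("h", 8), ("w", 16)]

-- dict[k] with KeyError excluded by Pre_; default 0 / "" only outside Pre_
def calculateDurationValue (duration : String) : Int :=
  midiToDuration.getD duration 0

def calculateDuplication (dur : String) : Int :=
  midiDuplication.getD dur 0

def noteDuration (note : List (String × String)) : String :=
  (PySem.Dict.ofList note).getD "duration" ""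

-- inner 'for j in range(i): result.append(note)' = i copies of note
def expandMeasure (measure : List (List (String × String))) : List (List (String × String)) :=
  measure.foldl (fun result note =>
    result ++ List.replicate (calculateDuplication (noteDuration note)).toNat note) []

def computeDurationVector (input : List (List (List (String × String)))) : List (List Int) :=
  input.foldl (fun durations measure =>
    durations ++ [(expandMeasure measure).foldl
      (fun tmpVector note => tmpVector ++ [calculateDurationValue (noteDuration note)]) []]) []

-- ===== PORT B =====
def durationVectorTable : PySem.Dict String (List Int) :=
  PySem.Dict.ofList [("16", [4]), ("8d", [3, 3]), ("q", [2, 2, 2, 2]),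
                     ("h", List.replicate 8 1), ("w", List.replicate 16 0)]

def computeDurationVector_alt (input : List (List (List (String × String)))) : List (List Int) :=
  input.map (fun measure =>
    measure.flatMap (fun note =>
      durationVectorTable.getD ((PySem.Dict.ofList note).getD "duration" "") []))

-- ===== PRECONDITION & SPEC =====
-- Pre_: every note has a 'duration' key mapping to a known duration; otherwise Python A raises KeyError.
def Pre_computeDurationVector (input : List (List (List (String × String)))) : Prop :=
  ∀ m ∈ input, ∀ note ∈ m,
    ∃ d ∈ (["16", "8d", "q", "h", "w"] : List String),
      (PySem.Dict.ofList note).get? "duration" = some d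
instance (input : List (List (List (String × String)))) : Decidable (Pre_computeDurationVector input) := by unfold Pre_computeDurationVector; infer_instance
def pvWitness_computeDurationVector : (List (List (List (String × String)))) :=
  [[[("duration", "16")], [("duration", "q")]], [[("duration", "w")]]]

def Spec_computeDurationVector (input : List (List (List (String × String)))) (out : List (List Int)) : Prop := out = computeDurationVector_alt input
instance (input : List (List (List (String × String)))) (out : List (List Int)) : Decidable (Spec_computeDurationVector input out) := by unfold Spec_computeDurationVector; infer_instance

-- ===== CLAIM =====
def Claim_equal_computeDurationVector : Prop := ∀ (input : List (List (List (String × String)))), Dom_computeDurationVector input → Pre_computeDurationVector input → Spec_computeDurationVector input (computeDurationVector input)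

-- ===== LEMMAS AND PROOFS =====
theorem table_eq (s : String) :
    List.replicate (midiDuplication.getD s 0).toNat (midiToDuration.getD s 0) =
      durationVectorTable.getD s [] := by
  simp [midiDuplication, midiToDuration, durationVectorTable, PySem.Dict.ofList,
    PySem.Dict.update, PySem.Dict.getD_insert, PySem.Dict.getD_empty]
  split_ifs <;> rfl

theorem measure_eq (m : List (List (String × String))) :
    (expandMeasure m).foldl
      (fun tmpVector note => tmpVector ++ [calculateDurationValue (noteDuration note)]) [] =
    m.flatMap (fun note =>
      durationVectorTable.getD ((PySem.Dict.ofList note).getD "duration" "") []) := by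
  rw [PySem.List.foldl_append_singleton_eq_map, List.nil_append, expandMeasure,
      PySem.List.foldl_append_eq_flatMap, List.nil_append, List.map_flatMap]
  congr 1
  funext note
  rw [List.map_replicate]
  exact table_eq (noteDuration note)

-- ===== VERDICT =====
theorem computeDurationVector_spec : Claim_equal_computeDurationVector := by
  intro input _ _
  unfold Spec_computeDurationVector computeDurationVector computeDurationVector_alt
  rw [PySem.List.foldl_append_singleton_eq_map, List.nil_append]
  congr 1
  funext m
  exact measure_eq m
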